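-- pv_equiv track=rewrite | github.com/nabekabebe/Competitive-programming | BootCamp/findTheDuplicateNumber.py | search
-- ===== SOURCE A (Python) =====
-- def search(nums, val):
--     count, index, before = 0, -1, 0
--     for i in range(len(nums)):
--         if nums[i] == val:
--             count += 1
--             index = i
--
--         elif nums[i] < val:
--             before += 1
--     return (count, before)
-- ===== SOURCE B (Python) =====
-- def search(nums, val):
--     cnt = {}
--     for x in nums:
--         cnt[x] = cnt.get(x, 0) + 1
--     before = sum(c for k, c in cnt.items() if k < val)
--     return (cnt.get(val, 0), before)
-- ===== Notes on version B (the rewrite author's own statement) =====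
-- stated objective: alternative
-- what changed: Replaces the index loop with equal/less-than branches by a one-pass frequency dictionary, reading the count of val from the table and summing tallies over the distinct keys below val.
import Mathlib
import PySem

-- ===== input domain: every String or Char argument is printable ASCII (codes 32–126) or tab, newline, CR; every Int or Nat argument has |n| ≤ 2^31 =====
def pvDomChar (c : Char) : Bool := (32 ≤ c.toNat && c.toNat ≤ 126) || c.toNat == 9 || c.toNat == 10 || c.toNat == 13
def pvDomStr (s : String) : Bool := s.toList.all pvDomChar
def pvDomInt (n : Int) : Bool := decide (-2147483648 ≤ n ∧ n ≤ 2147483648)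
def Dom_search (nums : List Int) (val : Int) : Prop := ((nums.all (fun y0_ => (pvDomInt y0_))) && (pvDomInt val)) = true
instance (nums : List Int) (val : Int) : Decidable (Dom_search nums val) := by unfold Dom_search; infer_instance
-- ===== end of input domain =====

-- B tallies a frequency dictionary in one pass and reads count/before from it instead of A's branching index loop (alternative decomposition, same cost).

-- ===== PORT A =====
def search (nums : List Int) (val : Int) : Int × Int :=
  -- state (count, index, before), initialised (0, -1, 0)
  let r := (PySem.List.pyRange 0 (PySem.List.len nums) 1).foldl
    (fun (s : Int × Int × Int) i =>
      let x := PySem.List.pyGetD nums i 0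
      if x = val then (s.1 + 1, i, s.2.2)
      else if x < val then (s.1, s.2.1, s.2.2 + 1)
      else s) (0, -1, 0)
  (r.1, r.2.2)

-- ===== PORT B =====
def search_alt (nums : List Int) (val : Int) : Int × Int :=
  let cnt : PySem.Dict Int Int :=
    nums.foldl (fun d x => d.insert x (d.getD x 0 + 1)) PySem.Dict.empty
  let before := ((cnt.items.filter (fun p => p.1 < val)).map (fun p => p.2)).sum
  (cnt.getD val 0, before)

-- ===== PRECONDITION & SPEC =====
def Spec_search (nums : List Int) (val : Int) (out : Int × Int) : Prop := out = search_alt nums val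
instance (nums : List Int) (val : Int) (out : Int × Int) : Decidable (Spec_search nums val out) := by unfold Spec_search; infer_instance

-- ===== CLAIM (what is proved, stated in full; the proofs are below) =====
def Claim_equal_search : Prop := ∀ (nums : List Int) (val : Int), Dom_search nums val → Spec_search nums val (search nums val)

-- ===== LEMMAS AND PROOFS =====

-- A's loop ignores the index field as far as count/before go: project it away.
theorem projA (nums : List Int) (val : Int) :
    ∀ (l : List Int) (s : Int × Int × Int),
      (((l.foldl (fun (s : Int × Int × Int) i =>
          if PySem.List.pyGetD nums i 0 = val then (s.1 + 1, i, s.2.2)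
          else if PySem.List.pyGetD nums i 0 < val then (s.1, s.2.1, s.2.2 + 1)
          else s) s).1),
       ((l.foldl (fun (s : Int × Int × Int) i =>
          if PySem.List.pyGetD nums i 0 = val then (s.1 + 1, i, s.2.2)
          else if PySem.List.pyGetD nums i 0 < val then (s.1, s.2.1, s.2.2 + 1)
          else s) s).2.2)) =
      l.foldl (fun (p : Int × Int) i =>
          if PySem.List.pyGetD nums i 0 = val then (p.1 + 1, p.2)
          else if PySem.List.pyGetD nums i 0 < val then (p.1, p.2 + 1)
          else p) (s.1, s.2.2) := by
  intro l
  induction l with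
  | nil => intro s; rfl
  | cons x t ih =>
    intro s
    simp only [List.foldl_cons]
    rw [ih]
    split_ifs <;> rfl

-- the projected loop computes count/countP
theorem foldl_count (val : Int) :
    ∀ (l : List Int) (p : Int × Int),
      l.foldl (fun (p : Int × Int) x =>
          if x = val then (p.1 + 1, p.2)
          else if x < val then (p.1, p.2 + 1)
          else p) p =
      (p.1 + (l.count val : Int), p.2 + (l.countP (fun x => decide (x < val)) : Int)) := by
  intro l
  induction l with
  | nil => intro p; simp
  | cons x t ih =>
    intro p
    simp only [List.foldl_cons, ih]
    by_cases h1 : x = val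
    · subst h1
      simp
      ring
    · by_cases h2 : x < val
      · simp [h1, h2]
        ring
      · simp [h1, h2]

theorem sum_ite_mem (x : Int) :
    ∀ (F : List Int), F.Nodup →
      ((F.map (fun k => if k = x then (1 : Int) else 0)).sum) = if x ∈ F then 1 else 0 := by
  intro F
  induction F with
  | nil => simp
  | cons a t ih =>
    intro hnd
    simp only [List.map_cons, List.sum_cons, List.mem_cons]
    rcases List.nodup_cons.mp hnd with ⟨ha, ht⟩
    rw [ih ht]
    by_cases h : a = x
    · subst h; simp [ha]
    · simp [h, Ne.symm h]

-- sum of tallies of distinct keys below val = countP (< val)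
theorem sum_count_keys (val : Int) :
    ∀ (xs S : List Int), S.Nodup → (∀ x ∈ xs, x ∈ S) →
      ((S.filter (fun k => decide (k < val))).map (fun k => (xs.count k : Int))).sum =
        (xs.countP (fun x => decide (x < val)) : Int) := by
  intro xs
  induction xs with
  | nil => intro S _ _; simp
  | cons x t ih =>
    intro S hnd hmem
    have hx : x ∈ S := hmem x (List.mem_cons_self)
    have hmem' : ∀ y ∈ t, y ∈ S := fun y hy => hmem y (List.mem_cons_of_mem _ hy)
    have hcount : ∀ k : Int, ((x :: t).count k : Int) = (t.count k : Int) + (if k = x then (1:Int) else 0) := by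
      intro k
      by_cases h : k = x
      · subst h; simp
      · have hne : ¬ (x == k) = true := by simp; exact fun h' => h h'.symm
        simp [List.count_cons, hne, h]
    have hmapeq : ((S.filter (fun k => decide (k < val))).map (fun k => ((x :: t).count k : Int))) =
        ((S.filter (fun k => decide (k < val))).map
          (fun k => (t.count k : Int) + (if k = x then (1:Int) else 0))) := by
      apply List.map_congr_left; intro k _; exact hcount k
    rw [hmapeq, PySem.List.sum_map_add_int, ih S hnd hmem',
        sum_ite_mem x _ (hnd.filter _)]
    have hm : x ∈ S.filter (fun k => decide (k < val)) ↔ x < val := by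
      simp [List.mem_filter, hx]
    simp only [List.countP_cons]
    by_cases h2 : x < val
    · simp [hm, h2]
    · have : x ∉ S.filter (fun k => decide (k < val)) := fun hc => h2 (hm.mp hc)
      simp [this, h2]

-- ===== VERDICT (by name: the statement is the Claim_ definition above) =====
theorem search_spec : Claim_equal_search := by
  intro nums val _
  unfold Spec_search
  simp only [search, search_alt]
  -- B side: the insert loop is Counter(nums)
  rw [PySem.Dict.foldl_insert_getD_add_one_eq_counter, PySem.Dict.getD_counter,
      PySem.Dict.items_counter]
  -- A side: project away the index field, reduce to a fold over nums, then to counts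
  rw [projA nums val _ (0, -1, 0),
      PySem.List.foldl_pyRange_zero_pyGetD nums 0
        (fun (p : Int × Int) x =>
          if x = val then (p.1 + 1, p.2)
          else if x < val then (p.1, p.2 + 1)
          else p) ((0 : Int), (0 : Int)),
      foldl_count val]
  -- B's sum over distinct keys
  have hsum := sum_count_keys val nums (PySem.Set.ofList nums) (PySem.Set.nodup_ofList nums)
        (fun x hx => (PySem.Set.mem_ofList nums x).mpr hx)
  simp only [List.filter_map, List.map_map, Function.comp_def]
  rw [hsum]
  simp
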